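-- pv_equiv track=rewrite | github.com/AgatheJsnd/BDD-2 | src/activations/lifestyle_voyage.py | _get_voyage_service
-- ===== SOURCE A (Python) =====
-- def _get_voyage_service(destination: str, tags: dict) -> str:
--     """Recommande un service selon la destination."""
--     dest_lower = destination.lower() if destination else ""
--
--     if any(d in dest_lower for d in ["tokyo", "japon", "japan", "hong kong", "singapour"]):
--         return "Sélection voyage Asie: pièces légères, shopping guide Tokyo"
--     elif any(d in dest_lower for d in ["dubai", "abu dhabi", "émirats"]):
--         return "Sélection Moyen-Orient: tenues soirée, accessoires prestige"
--     elif any(d in dest_lower for d in ["courchevel", "megève", "chamonix", "val d'isère"]):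
--         return "Collection ski & montagne: cachemire, après-ski raffiné"
--     elif any(d in dest_lower for d in ["saint-tropez", "côte d'azur", "maldives", "riviera"]):
--         return "Sélection balnéaire: lunettes, sandales, tenues resort"
--     elif any(d in dest_lower for d in ["new york", "los angeles", "miami"]):
--         return "Sélection USA: style décontracté chic, sneakers premium"
--     elif any(d in dest_lower for d in ["milan", "rome", "italie"]):
--         return "Sélection Italie: élégance classique, cuir artisanal"
--     else:
--         return "Sélection voyage personnalisée selon votre destination"
-- ===== SOURCE B (Python) =====
-- _REGION_MESSAGES = [
--     "Sélection voyage Asie: pièces légères, shopping guide Tokyo",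
--     "Sélection Moyen-Orient: tenues soirée, accessoires prestige",
--     "Collection ski & montagne: cachemire, après-ski raffiné",
--     "Sélection balnéaire: lunettes, sandales, tenues resort",
--     "Sélection USA: style décontracté chic, sneakers premium",
--     "Sélection Italie: élégance classique, cuir artisanal",
-- ]
--
-- _DEFAULT = "Sélection voyage personnalisée selon votre destination"
--
-- # Inverted index: keyword -> region number (region order gives priority).
-- _KEYWORD_REGIONS = [
--     ("tokyo", 0), ("japon", 0), ("japan", 0), ("hong kong", 0), ("singapour", 0),
--     ("dubai", 1), ("abu dhabi", 1), ("émirats", 1),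
--     ("courchevel", 2), ("megève", 2), ("chamonix", 2), ("val d'isère", 2),
--     ("saint-tropez", 3), ("côte d'azur", 3), ("maldives", 3), ("riviera", 3),
--     ("new york", 4), ("los angeles", 4), ("miami", 4),
--     ("milan", 5), ("rome", 5), ("italie", 5),
-- ]
--
--
-- def _get_voyage_service(destination: str, tags: dict) -> str:
--     dest_lower = destination.lower() if destination else ""
--     # Aggregate: the highest-priority region is the MINIMUM region number over
--     # all matching keywords (no early exit, no per-region cascade).
--     best = min((region for kw, region in _KEYWORD_REGIONS if kw in dest_lower),
--                default=None)
--     return _DEFAULT if best is None else _REGION_MESSAGES[best]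
-- ===== Notes on version B (the rewrite author's own statement) =====
-- stated objective: alternative
-- what changed: Replaces the first-match if/elif cascade with an inverted keyword->region index: B collects every matching keyword and aggregates by taking the minimum region number (no early exit), then looks the message up by that number.
import Mathlib
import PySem

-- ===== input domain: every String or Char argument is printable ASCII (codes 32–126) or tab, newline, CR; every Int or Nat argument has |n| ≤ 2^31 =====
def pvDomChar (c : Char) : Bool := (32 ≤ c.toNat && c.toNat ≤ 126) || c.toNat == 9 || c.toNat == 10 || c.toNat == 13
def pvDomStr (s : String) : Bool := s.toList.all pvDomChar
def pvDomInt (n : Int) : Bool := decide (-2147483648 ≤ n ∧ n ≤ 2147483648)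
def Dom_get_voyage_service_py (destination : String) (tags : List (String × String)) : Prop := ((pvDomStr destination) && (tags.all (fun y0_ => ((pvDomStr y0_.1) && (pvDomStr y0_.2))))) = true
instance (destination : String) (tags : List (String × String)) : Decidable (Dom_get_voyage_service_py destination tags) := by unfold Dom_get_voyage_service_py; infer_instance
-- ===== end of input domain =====

-- B replaces A's first-match if/elif cascade by an inverted keyword->region index aggregated with min (alternative decomposition; same cost). A mutates nothing.


-- ===== PORT A =====
def get_voyage_service_py (destination : String) (tags : List (String × String)) : String :=
  let dest_lower := if destination ≠ "" then PySem.Str.lower destination else ""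
  if ["tokyo", "japon", "japan", "hong kong", "singapour"].any (fun d => PySem.Str.isIn d dest_lower) then
    "Sélection voyage Asie: pièces légères, shopping guide Tokyo"
  else if ["dubai", "abu dhabi", "émirats"].any (fun d => PySem.Str.isIn d dest_lower) then
    "Sélection Moyen-Orient: tenues soirée, accessoires prestige"
  else if ["courchevel", "megève", "chamonix", "val d'isère"].any (fun d => PySem.Str.isIn d dest_lower) then
    "Collection ski & montagne: cachemire, après-ski raffiné"
  else if ["saint-tropez", "côte d'azur", "maldives", "riviera"].any (fun d => PySem.Str.isIn d dest_lower) then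
    "Sélection balnéaire: lunettes, sandales, tenues resort"
  else if ["new york", "los angeles", "miami"].any (fun d => PySem.Str.isIn d dest_lower) then
    "Sélection USA: style décontracté chic, sneakers premium"
  else if ["milan", "rome", "italie"].any (fun d => PySem.Str.isIn d dest_lower) then
    "Sélection Italie: élégance classique, cuir artisanal"
  else
    "Sélection voyage personnalisée selon votre destination"

-- ===== PORT B =====
def regionMessages : List String :=
  [ "Sélection voyage Asie: pièces légères, shopping guide Tokyo",
    "Sélection Moyen-Orient: tenues soirée, accessoires prestige",
    "Collection ski & montagne: cachemire, après-ski raffiné",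
    "Sélection balnéaire: lunettes, sandales, tenues resort",
    "Sélection USA: style décontracté chic, sneakers premium",
    "Sélection Italie: élégance classique, cuir artisanal" ]

def voyageDefault : String := "Sélection voyage personnalisée selon votre destination"

def keywordRegions : List (String × Nat) :=
  [ ("tokyo", 0), ("japon", 0), ("japan", 0), ("hong kong", 0), ("singapour", 0),
    ("dubai", 1), ("abu dhabi", 1), ("émirats", 1),
    ("courchevel", 2), ("megève", 2), ("chamonix", 2), ("val d'isère", 2),
    ("saint-tropez", 3), ("côte d'azur", 3), ("maldives", 3), ("riviera", 3),
    ("new york", 4), ("los angeles", 4), ("miami", 4),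
    ("milan", 5), ("rome", 5), ("italie", 5) ]

def get_voyage_service_py_alt (destination : String) (tags : List (String × String)) : String :=
  let dest_lower := if destination ≠ "" then PySem.Str.lower destination else ""
  let best := PySem.List.min?
    ((keywordRegions.filter (fun q => PySem.Str.isIn q.1 dest_lower)).map Prod.snd)
    (fun r => r)
  match best with
  | none => voyageDefault
  | some r => regionMessages.getD r voyageDefault

-- ===== PRECONDITION & SPEC =====
def Spec_get_voyage_service_py (destination : String) (tags : List (String × String)) (out : String) : Prop := out = get_voyage_service_py_alt destination tags
instance (destination : String) (tags : List (String × String)) (out : String) : Decidable (Spec_get_voyage_service_py destination tags out) := by unfold Spec_get_voyage_service_py; infer_instance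

-- ===== CLAIM (what is proved, stated in full; the proofs are below) =====
def Claim_equal_get_voyage_service_py : Prop := ∀ (destination : String) (tags : List (String × String)), Dom_get_voyage_service_py destination tags → Spec_get_voyage_service_py destination tags (get_voyage_service_py destination tags)

-- ===== LEMMAS AND PROOFS =====

-- filtering a constant-region block and projecting the region gives a replicate
theorem filt_map_block {α : Type} (p : α → Bool) (kws : List α) (i : Nat) :
    (((kws.map (fun k => (k, i))).filter (fun q => p q.1)).map Prod.snd)
      = List.replicate (kws.countP p) i := by
  induction kws with
  | nil => rfl
  | cons k t ih =>
      by_cases h : p k <;>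
        simp [h, ih, List.replicate_succ]

theorem countP_ne_zero_of_any {α : Type} (p : α → Bool) (l : List α)
    (h : l.any p = true) : l.countP p ≠ 0 := by
  intro h0
  rw [List.countP_eq_zero] at h0
  rcases List.any_eq_true.mp h with ⟨a, ha, hpa⟩
  exact h0 a ha hpa

theorem countP_eq_zero_of_not_any {α : Type} (p : α → Bool) (l : List α)
    (h : ¬ l.any p = true) : l.countP p = 0 :=
  List.countP_eq_zero.mpr (fun a ha hpa => h (List.any_eq_true.mpr ⟨a, ha, hpa⟩))

theorem foldl_min_of_le (i : Nat) (l : List Nat) (h : ∀ x ∈ l, i ≤ x) :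
    l.foldl min i = i := by
  induction l generalizing i with
  | nil => rfl
  | cons a t ih =>
      have ha : i ≤ a := h a (by simp)
      simp only [List.foldl_cons, Nat.min_eq_left ha]
      exact ih i (fun x hx => h x (by simp [hx]))

theorem min?_replicate_append (c i : Nat) (l : List Nat) (hc : c ≠ 0)
    (h : ∀ x ∈ l, i ≤ x) :
    PySem.List.min? (List.replicate c i ++ l) (fun r => r) = some i := by
  obtain ⟨n, rfl⟩ := Nat.exists_eq_succ_of_ne_zero hc
  rw [List.replicate_succ, List.cons_append, PySem.List.min?_id_cons]
  congr 1
  exact foldl_min_of_le i _ (by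
    intro x hx
    rcases List.mem_append.mp hx with hx | hx
    · exact (List.eq_of_mem_replicate hx).ge
    · exact h x hx)

theorem ports_agree (destination : String) (tags : List (String × String)) :
    get_voyage_service_py destination tags = get_voyage_service_py_alt destination tags := by
  unfold get_voyage_service_py get_voyage_service_py_alt
  set dl := (if destination ≠ "" then PySem.Str.lower destination else "") with hdl
  have hB : ((keywordRegions.filter (fun q => PySem.Str.isIn q.1 dl)).map Prod.snd)
      = List.replicate (["tokyo", "japon", "japan", "hong kong", "singapour"].countP (fun d => PySem.Str.isIn d dl)) 0
        ++ (List.replicate (["dubai", "abu dhabi", "émirats"].countP (fun d => PySem.Str.isIn d dl)) 1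
        ++ (List.replicate (["courchevel", "megève", "chamonix", "val d'isère"].countP (fun d => PySem.Str.isIn d dl)) 2
        ++ (List.replicate (["saint-tropez", "côte d'azur", "maldives", "riviera"].countP (fun d => PySem.Str.isIn d dl)) 3
        ++ (List.replicate (["new york", "los angeles", "miami"].countP (fun d => PySem.Str.isIn d dl)) 4
        ++ ((List.replicate (["milan", "rome", "italie"].countP (fun d => PySem.Str.isIn d dl)) 5) ++ ([] : List Nat)))))) := by
    have hrw : keywordRegions
        = (["tokyo", "japon", "japan", "hong kong", "singapour"].map (fun k => (k, 0)))
        ++ ((["dubai", "abu dhabi", "émirats"].map (fun k => (k, 1)))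
        ++ ((["courchevel", "megève", "chamonix", "val d'isère"].map (fun k => (k, 2)))
        ++ ((["saint-tropez", "côte d'azur", "maldives", "riviera"].map (fun k => (k, 3)))
        ++ ((["new york", "los angeles", "miami"].map (fun k => (k, 4)))
        ++ ((["milan", "rome", "italie"].map (fun k => (k, 5)))))))) := rfl
    rw [hrw]
    simp only [List.filter_append, List.map_append, filt_map_block (fun d => PySem.Str.isIn d dl), List.append_nil]
  simp only [hB]
  by_cases h1 : (["tokyo", "japon", "japan", "hong kong", "singapour"].any (fun d => PySem.Str.isIn d dl)) = true
  · rw [min?_replicate_append _ _ _ (countP_ne_zero_of_any _ _ h1) (by intro x hx; simp [List.mem_append, List.mem_replicate] at hx; omega)]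
    rw [if_pos h1]; rfl
  · rw [countP_eq_zero_of_not_any _ _ h1, List.replicate_zero, List.nil_append]
    by_cases h2 : (["dubai", "abu dhabi", "émirats"].any (fun d => PySem.Str.isIn d dl)) = true
    · rw [min?_replicate_append _ _ _ (countP_ne_zero_of_any _ _ h2) (by intro x hx; simp [List.mem_append, List.mem_replicate] at hx; omega)]
      rw [if_neg h1, if_pos h2]; rfl
    · rw [countP_eq_zero_of_not_any _ _ h2, List.replicate_zero, List.nil_append]
      by_cases h3 : (["courchevel", "megève", "chamonix", "val d'isère"].any (fun d => PySem.Str.isIn d dl)) = true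
      · rw [min?_replicate_append _ _ _ (countP_ne_zero_of_any _ _ h3) (by intro x hx; simp [List.mem_append, List.mem_replicate] at hx; omega)]
        rw [if_neg h1, if_neg h2, if_pos h3]; rfl
      · rw [countP_eq_zero_of_not_any _ _ h3, List.replicate_zero, List.nil_append]
        by_cases h4 : (["saint-tropez", "côte d'azur", "maldives", "riviera"].any (fun d => PySem.Str.isIn d dl)) = true
        · rw [min?_replicate_append _ _ _ (countP_ne_zero_of_any _ _ h4) (by intro x hx; simp [List.mem_append, List.mem_replicate] at hx; omega)]
          rw [if_neg h1, if_neg h2, if_neg h3, if_pos h4]; rfl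
        · rw [countP_eq_zero_of_not_any _ _ h4, List.replicate_zero, List.nil_append]
          by_cases h5 : (["new york", "los angeles", "miami"].any (fun d => PySem.Str.isIn d dl)) = true
          · rw [min?_replicate_append _ _ _ (countP_ne_zero_of_any _ _ h5) (by intro x hx; simp [List.mem_replicate] at hx; omega)]
            rw [if_neg h1, if_neg h2, if_neg h3, if_neg h4, if_pos h5]; rfl
          · rw [countP_eq_zero_of_not_any _ _ h5, List.replicate_zero, List.nil_append]
            by_cases h6 : (["milan", "rome", "italie"].any (fun d => PySem.Str.isIn d dl)) = true
            · rw [min?_replicate_append _ _ _ (countP_ne_zero_of_any _ _ h6) (by intro x hx; simp at hx)]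
              rw [if_neg h1, if_neg h2, if_neg h3, if_neg h4, if_neg h5, if_pos h6]; rfl
            · rw [countP_eq_zero_of_not_any _ _ h6, List.replicate_zero, List.nil_append]
              rw [if_neg h1, if_neg h2, if_neg h3, if_neg h4, if_neg h5, if_neg h6]; rfl

-- ===== VERDICT (by name: the statement is the Claim_ definition above) =====
theorem get_voyage_service_py_spec : Claim_equal_get_voyage_service_py := by
  intro destination tags _
  unfold Spec_get_voyage_service_py
  exact ports_agree destination tags
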